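-- pv_equiv track=rewrite | github.com/benchmarko/BMbench | bmbench.py | bench01
-- ===== SOURCE A (Python) =====
-- def bench01(n):
--   x = 0
--   sum = 0
--   for i in range(1, n + 1):
--     sum += i
--     if (sum >= n): # to avoid numbers above 2*n, divide by n using subtraction
--       sum -= n
--       x += 1
--
--   return x
-- ===== SOURCE B (Python) =====
-- def bench01(n):
--   # Closed form: each step adds i; the running sum wraps mod n, and the number
--   # of wraps over i=1..n is (n*(n+1)/2) // n = (n+1)//2 for positive n.
--   return (n + 1) // 2 if n > 0 else 0
-- ===== Notes on version B (the rewrite author's own statement) =====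
-- stated objective: faster
-- what changed: Replaced the O(n) accumulation loop by the closed form (n+1)//2 for n>0 (0 otherwise).
import Mathlib
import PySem

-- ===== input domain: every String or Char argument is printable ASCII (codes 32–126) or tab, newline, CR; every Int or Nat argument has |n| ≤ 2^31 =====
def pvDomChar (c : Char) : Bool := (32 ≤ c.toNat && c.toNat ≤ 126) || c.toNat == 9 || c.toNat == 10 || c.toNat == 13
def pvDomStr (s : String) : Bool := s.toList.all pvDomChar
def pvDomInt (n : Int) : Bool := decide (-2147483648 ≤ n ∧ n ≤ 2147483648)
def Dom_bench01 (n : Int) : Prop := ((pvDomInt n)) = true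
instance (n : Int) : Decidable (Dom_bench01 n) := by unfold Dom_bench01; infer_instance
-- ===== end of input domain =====

-- B replaces A's O(n) accumulation loop by the closed form (n+1)//2 (0 for n ≤ 0): faster.

-- ===== PORT A =====
def bench01 (n : Int) : Int :=
  let r := (PySem.List.pyRange 1 (n + 1) 1).foldl
    (fun (st : Int × Int) i =>
      let sum := st.2 + i
      if sum ≥ n then (st.1 + 1, sum - n) else (st.1, sum))
    (0, 0)
  r.1

-- ===== PORT B =====
def bench01_alt (n : Int) : Int :=
  if n > 0 then PySem.Int.floordiv (n + 1) 2 else 0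

-- ===== PRECONDITION & SPEC =====
def Spec_bench01 (n : Int) (out : Int) : Prop := out = bench01_alt n
instance (n : Int) (out : Int) : Decidable (Spec_bench01 n out) := by unfold Spec_bench01; infer_instance

-- ===== CLAIM (what is proved, stated in full; the proofs are below) =====
def Claim_equal_bench01 : Prop := ∀ (n : Int), Dom_bench01 n → Spec_bench01 n (bench01 n)

-- ===== LEMMAS AND PROOFS =====

def bench01Step (n : Int) : Int × Int → Int → Int × Int :=
  fun st i =>
    let sum := st.2 + i
    if sum ≥ n then (st.1 + 1, sum - n) else (st.1, sum)

-- Loop invariant: after processing i = 1..k (k ≤ n), the state (x, s) satisfies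
-- 0 ≤ s < n and 2*(n*x + s) = k*(k+1).
theorem bench01_invariant (n : Int) (hn : 0 < n) (k : Nat) (hk : (k : Int) ≤ n) :
    0 ≤ ((PySem.List.pyRange 1 ((k : Int) + 1) 1).foldl (bench01Step n) (0, 0)).2 ∧
    ((PySem.List.pyRange 1 ((k : Int) + 1) 1).foldl (bench01Step n) (0, 0)).2 < n ∧
    2 * (n * ((PySem.List.pyRange 1 ((k : Int) + 1) 1).foldl (bench01Step n) (0, 0)).1
        + ((PySem.List.pyRange 1 ((k : Int) + 1) 1).foldl (bench01Step n) (0, 0)).2)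
      = (k : Int) * ((k : Int) + 1) := by
  induction k with
  | zero =>
    rw [PySem.List.pyRange_one_eq_nil (by omega)]
    simpa using hn
  | succ m ih =>
    have hm : (m : Int) ≤ n := by push_cast at hk ⊢; omega
    obtain ⟨h0, h1, h2⟩ := ih hm
    have hsplit : PySem.List.pyRange 1 ((↑(m + 1) : Int) + 1) 1
        = PySem.List.pyRange 1 ((m : Int) + 1) 1 ++ [(m : Int) + 1] := by
      have := PySem.List.pyRange_one_succ_right (a := 1) (b := (m : Int) + 1) (by omega)
      push_cast
      push_cast at this
      convert this using 2
    rw [hsplit, List.foldl_append]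
    set st := (PySem.List.pyRange 1 ((m : Int) + 1) 1).foldl (bench01Step n) (0, 0) with hst
    simp only [List.foldl_cons, List.foldl_nil, bench01Step]
    have hki : (m : Int) + 1 ≤ n := by push_cast at hk; omega
    by_cases hge : st.2 + ((m : Int) + 1) ≥ n
    · simp only [hge, if_pos]
      refine ⟨by omega, by omega, ?_⟩
      push_cast
      nlinarith [h2]
    · simp only [hge, if_neg, not_false_iff]
      refine ⟨by omega, by omega, ?_⟩
      push_cast
      nlinarith [h2]

-- Uniqueness of the quotient: n*x + s = n*q + r with both remainders in [0, n) forces x = q.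
theorem quot_unique (n x s q r : Int) (hn : 0 < n) (hs0 : 0 ≤ s) (hs1 : s < n)
    (hr0 : 0 ≤ r) (hr1 : r < n) (h : n * x + s = n * q + r) : x = q := by
  by_contra hne
  rcases lt_or_gt_of_ne hne with hlt | hgt
  · have h1 : x + 1 ≤ q := by omega
    nlinarith
  · have h1 : q + 1 ≤ x := by omega
    nlinarith

theorem bench01_closed (n : Int) (hn : 0 < n) : bench01 n = PySem.Int.floordiv (n + 1) 2 := by
  have hkn : ((n.toNat : Int)) = n := by omega
  obtain ⟨h0, h1, h2⟩ := bench01_invariant n hn n.toNat (by omega)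
  rw [hkn] at h0 h1 h2
  have hb : bench01 n
      = ((PySem.List.pyRange 1 (n + 1) 1).foldl (bench01Step n) (0, 0)).1 := rfl
  rw [hb]
  set x := ((PySem.List.pyRange 1 (n + 1) 1).foldl (bench01Step n) (0, 0)).1
  set s := ((PySem.List.pyRange 1 (n + 1) 1).foldl (bench01Step n) (0, 0)).2
  rw [PySem.Int.floordiv_eq_ediv_of_pos (by omega)]
  rcases Int.even_or_odd n with ⟨m, hm⟩ | ⟨m, hm⟩
  · -- n = 2m even: quotient m, remainder m
    have hq : (n + 1) / 2 = m := by omega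
    rw [hq]
    refine quot_unique n x s m m hn h0 h1 (by omega) (by omega) ?_
    nlinarith [h2]
  · -- n = 2m+1 odd: quotient m+1, remainder 0
    have hq : (n + 1) / 2 = m + 1 := by omega
    rw [hq]
    refine quot_unique n x s (m + 1) 0 hn h0 h1 (by omega) (by omega) ?_
    nlinarith [h2]

-- ===== VERDICT (by name: the statement is the Claim_ definition above) =====
theorem bench01_spec : Claim_equal_bench01 := by
  intro n _
  unfold Spec_bench01 bench01_alt
  by_cases hn : n > 0
  · rw [if_pos hn, bench01_closed n hn]
  · rw [if_neg hn]
    have : PySem.List.pyRange 1 (n + 1) 1 = [] :=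
      PySem.List.pyRange_one_eq_nil (by omega)
    simp [bench01, this]
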